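-- pv_equiv track=rewrite | github.com/BISCodeRepo/PGpep | PGpep.py | reverse_translate
-- ===== SOURCE A (Python) =====
-- def reverse_translate(seq):
-- #     reverse_seq = seq[::-1]
--     return_seq = []
--     for i in seq:
--         if i == 'A':
--             return_seq.append('T')
--         elif i == 'T':
--             return_seq.append('A')
--         elif i == 'G':
--             return_seq.append('C')
--         elif i == 'C':
--             return_seq.append('G')
--     reverse_seq = "".join(return_seq)
--     protein = translate(reverse_seq)
--     return protein
--
-- def translate(seq):
--
--     table = {
--         'ATA':'I', 'ATC':'I', 'ATT':'I', 'ATG':'M',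
--         'ACA':'T', 'ACC':'T', 'ACG':'T', 'ACT':'T',
--         'AAC':'N', 'AAT':'N', 'AAA':'K', 'AAG':'K',
--         'AGC':'S', 'AGT':'S', 'AGA':'R', 'AGG':'R',
--         'CTA':'L', 'CTC':'L', 'CTG':'L', 'CTT':'L',
--         'CCA':'P', 'CCC':'P', 'CCG':'P', 'CCT':'P',
--         'CAC':'H', 'CAT':'H', 'CAA':'Q', 'CAG':'Q',
--         'CGA':'R', 'CGC':'R', 'CGG':'R', 'CGT':'R',
--         'GTA':'V', 'GTC':'V', 'GTG':'V', 'GTT':'V',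
--         'GCA':'A', 'GCC':'A', 'GCG':'A', 'GCT':'A',
--         'GAC':'D', 'GAT':'D', 'GAA':'E', 'GAG':'E',
--         'GGA':'G', 'GGC':'G', 'GGG':'G', 'GGT':'G',
--         'TCA':'S', 'TCC':'S', 'TCG':'S', 'TCT':'S',
--         'TTC':'F', 'TTT':'F', 'TTA':'L', 'TTG':'L',
--         'TAC':'Y', 'TAT':'Y', 'TAA':'_', 'TAG':'_',
--         'TGC':'C', 'TGT':'C', 'TGA':'_', 'TGG':'W',
--     }
--     protein =""
-- #     if len(seq)%3 == 0:
--     for i in range(0, len(seq), 3):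
--         codon = seq[i:i + 3]
--         if len(codon) == 3:
--             protein+= table[codon]
--     return protein
-- ===== SOURCE B (Python) =====
-- # B: single pass; maps each base directly to the base-4 index of its complement and
-- # looks the codon up in a 64-character amino-acid string instead of a 64-entry dict.
-- AMINO = "KNKNTTTTRSRSIIMIQHQHPPPPRRRRLLLLEDEDAAAAGGGGVVVV_Y_YSSSS_CWCLFLF"
-- COMP_IDX = {'A': 3, 'T': 0, 'G': 1, 'C': 2}  # index (in "ACGT") of the complement base
--
-- def reverse_translate(seq):
--     protein = []
--     cnt = 0
--     v = 0
--     for ch in seq: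
--         i = COMP_IDX.get(ch)
--         if i is not None:
--             v = v * 4 + i
--             cnt = cnt + 1
--             if cnt == 3:
--                 protein.append(AMINO[v])
--                 cnt = 0
--                 v = 0
--     return "".join(protein)
-- ===== Notes on version B (the rewrite author's own statement) =====
-- stated objective: alternative
-- what changed: B replaces A's two staged passes (complement the whole string via an if/elif chain into a list, then re-scan it by index in steps of 3, slicing codons out for a 64-entry dict lookup) with one fused pass that maps each valid base straight to the base-4 index of its complement, accumulates a numeric codon value v = v*4+i, and indexes a 64-character amino-acid lookup string when three bases have been seen.
import Mathlib
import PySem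

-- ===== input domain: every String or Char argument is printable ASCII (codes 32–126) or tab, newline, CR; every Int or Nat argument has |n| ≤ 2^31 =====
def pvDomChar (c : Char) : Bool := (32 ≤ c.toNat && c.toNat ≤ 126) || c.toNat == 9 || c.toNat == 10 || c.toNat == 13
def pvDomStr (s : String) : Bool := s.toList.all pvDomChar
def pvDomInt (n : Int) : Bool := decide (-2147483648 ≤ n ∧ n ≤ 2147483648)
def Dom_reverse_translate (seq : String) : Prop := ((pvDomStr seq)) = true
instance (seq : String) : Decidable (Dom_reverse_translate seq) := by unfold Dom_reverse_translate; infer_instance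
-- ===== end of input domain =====

-- B fuses A's two passes into one and replaces the 64-entry codon dict by a numeric
-- base-4 codon value indexing a 64-character amino-acid string; same cost, different
-- algorithmic machinery.

-- ===== PORT A =====
-- A's codon table dict, verbatim
def codonTable : PySem.Dict (List Char) Char := PySem.Dict.ofList [
    (['A','T','A'], 'I'), (['A','T','C'], 'I'), (['A','T','T'], 'I'), (['A','T','G'], 'M'),
    (['A','C','A'], 'T'), (['A','C','C'], 'T'), (['A','C','G'], 'T'), (['A','C','T'], 'T'),
    (['A','A','C'], 'N'), (['A','A','T'], 'N'), (['A','A','A'], 'K'), (['A','A','G'], 'K'),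
    (['A','G','C'], 'S'), (['A','G','T'], 'S'), (['A','G','A'], 'R'), (['A','G','G'], 'R'),
    (['C','T','A'], 'L'), (['C','T','C'], 'L'), (['C','T','G'], 'L'), (['C','T','T'], 'L'),
    (['C','C','A'], 'P'), (['C','C','C'], 'P'), (['C','C','G'], 'P'), (['C','C','T'], 'P'),
    (['C','A','C'], 'H'), (['C','A','T'], 'H'), (['C','A','A'], 'Q'), (['C','A','G'], 'Q'),
    (['C','G','A'], 'R'), (['C','G','C'], 'R'), (['C','G','G'], 'R'), (['C','G','T'], 'R'),
    (['G','T','A'], 'V'), (['G','T','C'], 'V'), (['G','T','G'], 'V'), (['G','T','T'], 'V'),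
    (['G','C','A'], 'A'), (['G','C','C'], 'A'), (['G','C','G'], 'A'), (['G','C','T'], 'A'),
    (['G','A','C'], 'D'), (['G','A','T'], 'D'), (['G','A','A'], 'E'), (['G','A','G'], 'E'),
    (['G','G','A'], 'G'), (['G','G','C'], 'G'), (['G','G','G'], 'G'), (['G','G','T'], 'G'),
    (['T','C','A'], 'S'), (['T','C','C'], 'S'), (['T','C','G'], 'S'), (['T','C','T'], 'S'),
    (['T','T','C'], 'F'), (['T','T','T'], 'F'), (['T','T','A'], 'L'), (['T','T','G'], 'L'),
    (['T','A','C'], 'Y'), (['T','A','T'], 'Y'), (['T','A','A'], '_'), (['T','A','G'], '_'),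
    (['T','G','C'], 'C'), (['T','G','T'], 'C'), (['T','G','A'], '_'), (['T','G','G'], 'W') ]

-- the body of A's 'for i in seq' loop (append the complement, via the if/elif chain)
def aCompStep (acc : List Char) (i : Char) : List Char :=
  if i = 'A' then acc ++ ['T']
  else if i = 'T' then acc ++ ['A']
  else if i = 'G' then acc ++ ['C']
  else if i = 'C' then acc ++ ['G']
  else acc

-- A's helper translate(seq): 'for i in range(0, len(seq), 3): codon = seq[i:i+3]; …'.
-- Python's table[codon] would raise KeyError on a missing key; it is ported as getD with an
-- arbitrary default, which is unreachable here: every base fed to translate is one of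
-- T/A/C/G (a complement produced by the loop above), and all 64 such triplets are keys.
def aTranslate (s : List Char) : List Char :=
  (PySem.List.pyRange 0 (PySem.List.len s) 3).foldl
    (fun protein i =>
      let codon := PySem.List.slice s (some i) (some (i + 3))
      if PySem.List.len codon = 3 then protein ++ [PySem.Dict.getD codonTable codon 'X']
      else protein)
    []

def reverse_translate (seq : String) : String :=
  String.ofList (aTranslate (seq.toList.foldl aCompStep []))

-- ===== PORT B =====
-- B's constants: the 64-char amino string (indexed by base-4 codon value, base order "ACGT")
-- and the dict mapping each valid base to the index of its complement
def AMINO : String := "KNKNTTTTRSRSIIMIQHQHPPPPRRRRLLLLEDEDAAAAGGGGVVVV_Y_YSSSS_CWCLFLF"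
def compIdx : PySem.Dict Char Int := PySem.Dict.ofList [('A',3),('T',0),('G',1),('C',2)]

-- the body of B's single loop; state = (cnt, v, protein).
-- Python's AMINO[v] would raise IndexError out of range; ported as pyGet? with a default,
-- unreachable: v < 64 always holds when cnt reaches 3.
def bStep (st : Int × Int × List Char) (ch : Char) : Int × Int × List Char :=
  match PySem.Dict.get? compIdx ch with
  | none => st
  | some i =>
    let v := st.2.1 * 4 + i
    let cnt := st.1 + 1
    if cnt = 3 then (0, 0, st.2.2 ++ [(PySem.Str.pyGet? AMINO v).getD 'X'])
    else (cnt, v, st.2.2)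

def reverse_translate_alt (seq : String) : String :=
  String.ofList (seq.toList.foldl bStep (0, 0, [])).2.2

-- ===== PRECONDITION & SPEC =====
def Spec_reverse_translate (seq : String) (out : String) : Prop := out = reverse_translate_alt seq
instance (seq : String) (out : String) : Decidable (Spec_reverse_translate seq out) := by unfold Spec_reverse_translate; infer_instance

-- ===== CLAIM =====
def Claim_equal_reverse_translate : Prop := ∀ (seq : String), Dom_reverse_translate seq → Spec_reverse_translate seq (reverse_translate seq)

-- ===== LEMMAS AND PROOFS =====

-- the complement map as a plain function (proof-side view of A's if/elif chain)
def comp? (ch : Char) : Option Char :=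
  if ch = 'A' then some 'T' else if ch = 'T' then some 'A'
  else if ch = 'G' then some 'C' else if ch = 'C' then some 'G' else none

-- index in "ACGT" of a (complemented) base, proof-side
def bIdx (c : Char) : Int :=
  if c = 'A' then 0 else if c = 'C' then 1 else if c = 'G' then 2 else 3

-- shared reading of both outputs: one amino acid per full codon of the complemented
-- string, leftovers dropped (stated with A's dict lookup)
def protChunks : List Char → List Char
  | x :: y :: z :: r => PySem.Dict.getD codonTable [x, y, z] 'X' :: protChunks r
  | _ => []

-- B's step on an already-complemented base
def cStep (st : Int × Int × List Char) (c : Char) : Int × Int × List Char :=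
  let v := st.2.1 * 4 + bIdx c
  let cnt := st.1 + 1
  if cnt = 3 then (0, 0, st.2.2 ++ [(PySem.Str.pyGet? AMINO v).getD 'X'])
  else (cnt, v, st.2.2)

-- A's chunking step at codon index k, as a named function over drop/take
def chunkStep (d : List Char) (acc : List Char) (k : Nat) : List Char :=
  let codon := (d.drop (3 * k)).take 3
  if PySem.List.len codon = 3 then acc ++ [PySem.Dict.getD codonTable codon 'X'] else acc

lemma aCompStep_eq (acc : List Char) (i : Char) :
    aCompStep acc i = match comp? i with | some c => acc ++ [c] | none => acc := by
  simp only [aCompStep, comp?]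
  split_ifs <;> rfl

lemma aComp_foldl (l : List Char) (acc : List Char) :
    l.foldl aCompStep acc = acc ++ l.filterMap comp? := by
  induction l generalizing acc with
  | nil => simp
  | cons x xs ih =>
    simp only [List.foldl_cons, List.filterMap_cons, aCompStep_eq]
    cases h : comp? x <;> simp [ih]

lemma chunkStep_shift (x y z : Char) (r : List Char) (acc : List Char) (k : Nat) :
    chunkStep (x :: y :: z :: r) acc (k + 1) = chunkStep r acc k := by
  have hd : (x :: y :: z :: r).drop (3 * (k + 1)) = r.drop (3 * k) := by
    rw [show 3 * (k + 1) = (3 * k) + 1 + 1 + 1 by ring]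
    simp [List.drop_succ_cons]
  simp only [chunkStep, hd]

lemma aTrans_chunks (d : List Char) (acc : List Char) :
    (List.range ((d.length + 2) / 3)).foldl (chunkStep d) acc = acc ++ protChunks d := by
  induction d using protChunks.induct generalizing acc with
  | case1 x y z r ih =>
    have hq : ((x :: y :: z :: r).length + 2) / 3 = (r.length + 2) / 3 + 1 := by
      simp only [List.length_cons]; omega
    rw [hq, List.range_succ_eq_map, List.foldl_cons, List.foldl_map]
    have h0 : chunkStep (x :: y :: z :: r) acc 0 = acc ++ [PySem.Dict.getD codonTable [x,y,z] 'X'] := by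
      norm_num [chunkStep, PySem.List.len_eq]
    have hfun : (fun (a : List Char) (k : Nat) => chunkStep (x :: y :: z :: r) a k.succ)
        = chunkStep r := by
      funext a k; exact chunkStep_shift x y z r a k
    rw [h0, hfun, ih]
    simp [protChunks]
  | case2 d h =>
    rcases d with _ | ⟨x, _ | ⟨y, _ | ⟨z, r⟩⟩⟩
    · simp [protChunks]
    · norm_num [protChunks, chunkStep, PySem.List.len_eq]
    · norm_num [protChunks, chunkStep, PySem.List.len_eq]
    · exact (h x y z r rfl).elim

lemma aTranslate_eq (d : List Char) : aTranslate d = protChunks d := by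
  have hfun : (fun (protein : List Char) (k : Nat) =>
      let codon := PySem.List.slice d (some (0 + 3 * (k:Int))) (some (0 + 3 * (k:Int) + 3))
      if PySem.List.len codon = 3 then protein ++ [PySem.Dict.getD codonTable codon 'X']
      else protein) = chunkStep d := by
    funext protein k
    have h1 : (0 + 3 * (k:Int)) = ((3*k : Nat) : Int) := by push_cast; ring
    have h2 : ((3*k : Nat) : Int) + 3 = ((3*k+3 : Nat) : Int) := by push_cast; ring
    have hc : PySem.List.slice d (some (0 + 3 * (k:Int))) (some (0 + 3 * (k:Int) + 3))
        = (d.drop (3*k)).take 3 := by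
      rw [h1, h2, PySem.List.slice_natCast]
      congr 1; omega
    simp only [chunkStep, hc]
  have hq : (if (0:Int) < (d.length:Int) then (((d.length:Int) - 0 + 3 - 1)/3).toNat else 0)
      = (d.length + 2) / 3 := by
    split_ifs with h
    · have h3 : ((d.length:Int) - 0 + 3 - 1) = ((d.length + 2 : Nat) : Int) := by push_cast; ring
      rw [h3, show ((3:Int)) = ((3:Nat):Int) from rfl, ← Int.natCast_div]
      exact Int.toNat_natCast _
    · have : d.length = 0 := by omega
      simp [this]
  unfold aTranslate
  rw [PySem.List.len_eq, PySem.List.pyRange_of_pos 0 _ (by norm_num), hq, List.foldl_map, hfun,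
    aTrans_chunks]
  simp

-- B's dict lookup equals index-of-complement
lemma compIdxGet_eq (ch : Char) :
    PySem.Dict.get? compIdx ch = (comp? ch).map bIdx := by
  have h : compIdx.items = [('A',3),('T',0),('G',1),('C',2)] := by decide
  by_cases h1 : ch = 'A'
  · subst h1; decide
  by_cases h2 : ch = 'T'
  · subst h2; decide
  by_cases h3 : ch = 'G'
  · subst h3; decide
  by_cases h4 : ch = 'C'
  · subst h4; decide
  simp only [PySem.Dict.get?, h]
  rw [List.find?_cons_of_neg, List.find?_cons_of_neg, List.find?_cons_of_neg, List.find?_cons_of_neg]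
  · simp [comp?, h1, h2, h3, h4]
  all_goals simp [beq_iff_eq]; first | exact Ne.symm h1 | exact Ne.symm h2 | exact Ne.symm h3 | exact Ne.symm h4

lemma bStep_eq (st : Int × Int × List Char) (ch : Char) :
    bStep st ch = match comp? ch with | none => st | some c => cStep st c := by
  simp only [bStep, compIdxGet_eq]
  cases comp? ch <;> rfl

lemma bFold_filterMap (l : List Char) (st : Int × Int × List Char) :
    l.foldl bStep st = (l.filterMap comp?).foldl cStep st := by
  induction l generalizing st with
  | nil => rfl
  | cons x xs ih =>
    simp only [List.foldl_cons, List.filterMap_cons, bStep_eq]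
    cases h : comp? x <;> simp [ih]

-- every output of comp? is a valid base
lemma comp?_mem (ch c : Char) (h : comp? ch = some c) : c ∈ (['A','C','G','T'] : List Char) := by
  simp only [comp?] at h
  split_ifs at h <;> (injection h with h; subst h; decide)

-- the amino-string lookup agrees with A's dict on every valid codon
set_option maxRecDepth 8192 in
lemma amino_eq (x y z : Char) (hx : x ∈ (['A','C','G','T'] : List Char))
    (hy : y ∈ (['A','C','G','T'] : List Char)) (hz : z ∈ (['A','C','G','T'] : List Char)) :
    (PySem.Str.pyGet? AMINO ((bIdx x * 4 + bIdx y) * 4 + bIdx z)).getD 'X'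
      = PySem.Dict.getD codonTable [x, y, z] 'X' := by
  fin_cases hx <;> fin_cases hy <;> fin_cases hz <;> decide

lemma bFold_chunks (d : List Char) (p : List Char)
    (hd : ∀ c ∈ d, c ∈ (['A','C','G','T'] : List Char)) :
    (d.foldl cStep (0, 0, p)).2.2 = p ++ protChunks d := by
  induction d using protChunks.induct generalizing p with
  | case1 x y z r ih =>
    have hx := hd x (by simp)
    have hy := hd y (by simp)
    have hz := hd z (by simp)
    have h1 : cStep (0, 0, p) x = (1, bIdx x, p) := by norm_num [cStep]
    have h2 : cStep (1, bIdx x, p) y = (2, bIdx x * 4 + bIdx y, p) := by norm_num [cStep]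
    have h3 : cStep (2, bIdx x * 4 + bIdx y, p) z
        = (0, 0, p ++ [PySem.Dict.getD codonTable [x, y, z] 'X']) := by
      norm_num [cStep]
      exact amino_eq x y z hx hy hz
    rw [List.foldl_cons, List.foldl_cons, List.foldl_cons, h1, h2, h3,
      ih _ (fun c hc => hd c (by simp [hc]))]
    simp [protChunks]
  | case2 d h =>
    rcases d with _ | ⟨x, _ | ⟨y, _ | ⟨z, r⟩⟩⟩
    · simp [protChunks]
    · rw [List.foldl_cons]; norm_num [cStep, protChunks]
    · rw [List.foldl_cons, List.foldl_cons]; norm_num [cStep, protChunks]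
    · exact (h x y z r rfl).elim

-- ===== VERDICT =====
theorem reverse_translate_spec : Claim_equal_reverse_translate := by
  intro seq _
  unfold Spec_reverse_translate reverse_translate reverse_translate_alt
  rw [aComp_foldl, bFold_filterMap, List.nil_append, aTranslate_eq,
    bFold_chunks _ _ (fun c hc => by
      rcases List.mem_filterMap.mp hc with ⟨a, _, ha⟩
      exact comp?_mem a c ha)]
  simp
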